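-- pv_equiv track=rewrite | github.com/bitsofbits/advent_of_code | 2024/day_09/python/implementation.py | build_gap_map
-- ===== SOURCE A (Python) =====
-- def build_gap_map(dense_map):
--     gap_map = []
--     start = None
--     for i, x in enumerate(dense_map):
--         if start is None:
--             if x is None:
--                 start = i
--         else:
--             if x is not None:
--                 gap_map.append((start, i - start))
--                 start = None
--     if start is not None:
--         gap_map.append((start, len(dense_map) - start))
--     return gap_map
-- ===== SOURCE B (Python) =====
-- def build_gap_map(dense_map):
--     # Run-splitting scan: find each maximal run of equal None-ness with an
--     # inner index advance, record runs of None as (start, length).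
--     gaps = []
--     n = len(dense_map)
--     i = 0
--     while i < n:
--         is_gap = dense_map[i] is None
--         j = i + 1
--         while j < n and (dense_map[j] is None) == is_gap:
--             j += 1
--         if is_gap:
--             gaps.append((i, j - i))
--         i = j
--     return gaps
-- ===== Notes on version B (the rewrite author's own statement) =====
-- stated objective: alternative
-- what changed: Replaces A's one-element-at-a-time start/flush state machine with a run-splitting scan: an inner loop finds each maximal run of equal None-ness and records None-runs directly as (start, length).
import Mathlib
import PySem

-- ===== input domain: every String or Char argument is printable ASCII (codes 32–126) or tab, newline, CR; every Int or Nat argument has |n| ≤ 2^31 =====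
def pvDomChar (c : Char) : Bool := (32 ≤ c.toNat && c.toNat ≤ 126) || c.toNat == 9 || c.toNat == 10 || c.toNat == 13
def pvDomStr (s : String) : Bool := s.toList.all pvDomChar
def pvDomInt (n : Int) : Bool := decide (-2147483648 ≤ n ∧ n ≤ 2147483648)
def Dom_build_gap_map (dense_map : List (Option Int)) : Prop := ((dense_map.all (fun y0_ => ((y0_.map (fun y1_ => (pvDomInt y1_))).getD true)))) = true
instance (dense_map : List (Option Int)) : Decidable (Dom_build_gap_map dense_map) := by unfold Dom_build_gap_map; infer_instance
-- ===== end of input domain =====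

-- B replaces A's start/flush state machine by a run-splitting scan (alternative decomposition, same O(n) cost).


-- ===== PORT A =====
-- A's loop body: state = (gap_map, start); branches in the same order as the Python.
def gapStepA (st : List (Int × Int) × Option Int) (ix : Int × Option Int) :
    List (Int × Int) × Option Int :=
  match st.2 with
  | none =>
    match ix.2 with
    | none => (st.1, some ix.1)
    | some _ => st
  | some s =>
    match ix.2 with
    | none => st
    | some _ => (st.1 ++ [(s, ix.1 - s)], none)

def build_gap_map (dense_map : List (Option Int)) : List (Int × Int) :=
  let f := (PySem.List.enumerate dense_map 0).foldl gapStepA ([], none)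
  match f.2 with
  | none => f.1
  | some s => f.1 ++ [(s, (dense_map.length : Int) - s)]

-- ===== PORT B =====
-- B's outer while loop: peel one maximal run of equal None-ness per step
-- (the inner 'while j < n' advance is the takeWhile/dropWhile over the tail).
def gapRunsB : List (Option Int) → Int → List (Int × Int)
  | [], _ => []
  | x :: xs, i =>
    let isGap := x.isNone
    let run := xs.takeWhile (fun y => y.isNone == isGap)
    let rest := xs.dropWhile (fun y => y.isNone == isGap)
    (if isGap then [(i, (run.length : Int) + 1)] else []) ++
      gapRunsB rest (i + run.length + 1)
termination_by l => l.length
decreasing_by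
  simpa using Nat.lt_succ_of_le (List.length_dropWhile_le _ xs)

def build_gap_map_alt (dense_map : List (Option Int)) : List (Int × Int) :=
  gapRunsB dense_map 0

-- ===== PRECONDITION & SPEC =====
def Spec_build_gap_map (dense_map : List (Option Int)) (out : List (Int × Int)) : Prop := out = build_gap_map_alt dense_map
instance (dense_map : List (Option Int)) (out : List (Int × Int)) : Decidable (Spec_build_gap_map dense_map out) := by unfold Spec_build_gap_map; infer_instance

-- ===== CLAIM (what is proved, stated in full; the proofs are below) =====
def Claim_equal_build_gap_map : Prop := ∀ (dense_map : List (Option Int)), Dom_build_gap_map dense_map → Spec_build_gap_map dense_map (build_gap_map dense_map)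

-- ===== LEMMAS AND PROOFS =====

-- A's fold, generalized over the starting index, accumulator and start-state,
-- with the final flush at index k + l.length (= len(dense_map) at the top level).
def resA (l : List (Option Int)) (k : Int) (acc : List (Int × Int)) (st : Option Int) :
    List (Int × Int) :=
  let f := (PySem.List.enumerate l k).foldl gapStepA (acc, st)
  match f.2 with
  | none => f.1
  | some s => f.1 ++ [(s, (k + l.length) - s)]

-- what the fold produces while inside a gap that started at s
def gapCont (l : List (Option Int)) (k s : Int) : List (Int × Int) :=
  let c := (l.takeWhile (fun y => y.isNone)).length
  (s, (k + c) - s) :: gapRunsB (l.dropWhile (fun y => y.isNone)) (k + c)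

-- stepping past a non-None head one element at a time
lemma gapRunsB_some (v : Int) (xs : List (Option Int)) (k : Int) :
    gapRunsB (some v :: xs) k = gapRunsB xs (k + 1) := by
  cases xs with
  | nil => simp [gapRunsB]
  | cons y ys =>
    cases y with
    | none => simp [gapRunsB]
    | some w =>
      rw [gapRunsB, gapRunsB]
      simp [List.takeWhile, List.dropWhile]
      ring_nf

lemma resA_none (l : List (Option Int)) (k : Int) (acc : List (Int × Int)) :
    resA l k acc none = acc ++ gapRunsB l k ∧
    ∀ s : Int, resA l k acc (some s) = acc ++ gapCont l k s := by
  induction l generalizing k acc with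
  | nil =>
    refine ⟨by simp [resA, gapRunsB, PySem.List.enumerate], ?_⟩
    intro s
    simp [resA, gapCont, gapRunsB, PySem.List.enumerate]
  | cons x xs ih =>
    cases x with
    | some v =>
      constructor
      · rw [gapRunsB_some]
        have h := (ih (k + 1) acc).1
        simp only [resA, PySem.List.enumerate_cons, List.foldl_cons, gapStepA] at *
        convert h using 5
        exact Prod.ext rfl (by push_cast [List.length_cons]; ring)
      · intro s
        have h := (ih (k + 1) (acc ++ [(s, k - s)])).1
        simp only [resA, PySem.List.enumerate_cons, List.foldl_cons, gapStepA] at *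
        rw [show acc ++ gapCont (some v :: xs) k s
              = (acc ++ [(s, k - s)]) ++ gapRunsB xs (k + 1) by
            simp [gapCont, List.takeWhile, List.dropWhile, gapRunsB_some]]
        convert h using 5
        exact Prod.ext rfl (by push_cast [List.length_cons]; ring)
    | none =>
      constructor
      · have h := (ih (k + 1) acc).2 k
        simp only [resA, PySem.List.enumerate_cons, List.foldl_cons, gapStepA] at *
        rw [show acc ++ gapRunsB (none :: xs) k = acc ++ gapCont xs (k + 1) k by
            simp only [gapRunsB, gapCont]
            simp [add_assoc]
            constructor
            · ring
            · congr 1; ring]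
        convert h using 5
        exact Prod.ext rfl (by push_cast [List.length_cons]; ring)
      · intro s
        have h := (ih (k + 1) acc).2 s
        simp only [resA, PySem.List.enumerate_cons, List.foldl_cons, gapStepA] at *
        rw [show acc ++ gapCont (none :: xs) k s = acc ++ gapCont xs (k + 1) s by
            simp only [gapCont, List.takeWhile, List.dropWhile]
            simp
            constructor
            · ring
            · congr 1; ring]
        convert h using 5
        exact Prod.ext rfl (by push_cast [List.length_cons]; ring)

-- ===== VERDICT (by name: the statement is the Claim_ definition above) =====
theorem build_gap_map_spec : Claim_equal_build_gap_map := by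
  intro l _
  have h := (resA_none l 0 []).1
  simp only [resA, zero_add, List.nil_append] at h
  unfold Spec_build_gap_map build_gap_map build_gap_map_alt
  simpa using h
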